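-- pv_equiv track=rewrite | github.com/seoyoung81/Algorythm | 프로그래머스/lv2/12913. 땅따먹기/땅따먹기.py | solution
-- ===== SOURCE A (Python) =====
-- def solution(land):
--     answer = 0
--     m = len(land)
--     n = len(land[0])
--     for i in range(1,m):
--         for j in range(n):
--             # 가장 max 값을 계속 누적시켜서 최적의 경로를 찾자
--             land[i][j] += max(land[i-1][:j] + land[i-1][j+1:])
--
--     answer = max(land[m-1])
--     return answer
-- ===== SOURCE B (Python) =====
-- def solution(land):
--     prev = land[0]
--     for row in land[1:]:
--         pref = []
--         run = None
--         for v in prev: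
--             run = v if run is None or v > run else run
--             pref.append(run)
--         suf = []
--         run = None
--         for v in reversed(prev):
--             run = v if run is None or v > run else run
--             suf.append(run)
--         suf.reverse()
--         n = len(prev)
--         nxt = []
--         for j in range(n):
--             cands = ([pref[j - 1]] if j > 0 else []) + ([suf[j + 1]] if j < n - 1 else [])
--             nxt.append(row[j] + max(cands))
--         prev = nxt
--     return max(prev)
-- ===== Notes on version B (the rewrite author's own statement) =====
-- stated objective: faster
-- what changed: B replaces A's per-column rescan of the previous row (max over the row minus one column, for every column) by one prefix-maximum and one suffix-maximum sweep of the previous row, so each excluded-column maximum is max(pref[j-1], suf[j+1]) in O(1), turning each row step from O(n^2) into O(n).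
-- outside the precondition, e.g. on solution([[1, 2], [0, 0, 9]]): A returns 9, B returns 2
import Mathlib
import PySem

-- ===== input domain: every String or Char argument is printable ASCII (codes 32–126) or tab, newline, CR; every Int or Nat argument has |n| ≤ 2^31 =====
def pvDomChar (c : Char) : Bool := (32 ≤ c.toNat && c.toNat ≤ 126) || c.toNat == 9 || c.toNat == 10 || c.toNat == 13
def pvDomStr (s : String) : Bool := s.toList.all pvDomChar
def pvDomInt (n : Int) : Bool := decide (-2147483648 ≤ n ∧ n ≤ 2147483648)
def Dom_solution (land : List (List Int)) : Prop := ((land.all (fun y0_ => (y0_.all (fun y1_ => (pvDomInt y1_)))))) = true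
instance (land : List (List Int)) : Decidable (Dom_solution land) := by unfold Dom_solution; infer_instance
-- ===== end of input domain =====

-- B computes one prefix-maximum and one suffix-maximum sweep of the previous row per step
-- instead of rescanning the row for every column (A is O(m*n^2), B is O(m*n)); A mutates
-- `land` in place while B does not — the equivalence proved here is about the RETURN value only.


-- ===== PORT A =====
-- for i in range(1,m): for j in range(n): land[i][j] += max(land[i-1][:j] + land[i-1][j+1:])
-- ported as a recursion over the remaining rows carrying the already-updated previous row;
-- max() of an empty slice / land[0] of an empty land raise in Python — Pre_ excludes those,
-- the port returns a .getD 0 default there.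
def solutionGo (n : Nat) (prev : List Int) (rest : List (List Int)) : List Int :=
  match rest with
  | [] => prev
  | cur :: rest' =>
      solutionGo n
        ((PySem.List.pyRange 0 (n : Int) 1).map (fun j =>
          PySem.List.pyGetD cur j 0 +
            (PySem.List.max?
              (PySem.List.slice prev none (some j) ++ PySem.List.slice prev (some (j + 1)) none)
              (fun y => y)).getD 0))
        rest'

def solution (land : List (List Int)) : Int :=
  match land with
  | [] => 0  -- Python: IndexError on land[0]; outside Pre_
  | first :: rest =>
      (PySem.List.max? (solutionGo first.length first rest) (fun y => y)).getD 0

-- ===== PORT B =====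
-- the inner Python loop `run = v if run is None or v > run else run; out.append(run)`
-- as the obvious structural recursion carrying `run`:
def scanMax (run : Option Int) (xs : List Int) : List Int :=
  match xs with
  | [] => []
  | v :: t =>
      let r := match run with | none => v | some r0 => if v > r0 then v else r0
      r :: scanMax (some r) t

-- per row: pref = forward running maxima of prev; suf = reverse(running maxima of reversed prev);
-- nxt[j] = row[j] + max(([pref[j-1]] if j>0 else []) + ([suf[j+1]] if j<n-1 else []))
def solutionAltGo (prev : List Int) (rest : List (List Int)) : List Int :=
  match rest with
  | [] => prev
  | row :: rest' =>
      let pref := scanMax none prev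
      let suf := (scanMax none prev.reverse).reverse
      let n : Int := (prev.length : Int)
      solutionAltGo
        ((PySem.List.pyRange 0 n 1).map (fun j =>
          PySem.List.pyGetD row j 0 +
            (PySem.List.max?
              ((if 0 < j then [PySem.List.pyGetD pref (j - 1) 0] else []) ++
               (if j < n - 1 then [PySem.List.pyGetD suf (j + 1) 0] else []))
              (fun y => y)).getD 0))
        rest'

def solution_alt (land : List (List Int)) : Int :=
  match land with
  | [] => 0  -- Python: IndexError on land[0]; outside Pre_
  | first :: rest =>
      (PySem.List.max? (solutionAltGo first rest) (fun y => y)).getD 0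

-- ===== PRECONDITION & SPEC =====
-- Pre_ excludes the inputs where A raises (empty land, a row shorter than land[0],
-- a single-column land with ≥ 2 rows) and ragged inputs (a row longer than land[0]) on
-- which A's mixture of len(land[0])-bounded updates with untouched trailing elements is
-- an accident of its in-place implementation; B treats only the first len(land[0]) columns there.
def Pre_solution (land : List (List Int)) : Prop :=
  land ≠ [] ∧ (∀ row ∈ land, row.length = (land.headD []).length) ∧
    1 ≤ (land.headD []).length ∧ (2 ≤ land.length → 2 ≤ (land.headD []).length)
instance (land : List (List Int)) : Decidable (Pre_solution land) := by
  unfold Pre_solution; infer_instance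
def pvWitness_solution : List (List Int) := [[1, 2, 3], [4, 5, 6], [7, 8, 9]]
def Spec_solution (land : List (List Int)) (out : Int) : Prop := out = solution_alt land
instance (land : List (List Int)) (out : Int) : Decidable (Spec_solution land out) := by
  unfold Spec_solution; infer_instance

-- ===== CLAIM (what is proved, stated in full; the proofs are below) =====
def Claim_equal_solution : Prop :=
  ∀ (land : List (List Int)), Dom_solution land → Pre_solution land →
    Spec_solution land (solution land)

-- ===== LEMMAS AND PROOFS =====

-- the max value of a nonempty list (0 on [], never used there)
def exMax (l : List Int) : Int :=
  match l with
  | [] => 0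
  | h :: t => t.foldl max h

theorem foldl_max_mem (t : List Int) (h : Int) : t.foldl max h ∈ h :: t := by
  induction t generalizing h with
  | nil => simp [List.foldl]
  | cons v t' ih =>
      show List.foldl max (max h v) t' ∈ h :: v :: t'
      rcases List.mem_cons.mp (ih (max h v)) with h' | h'
      · rw [h']
        rcases max_choice h v with hm | hm <;> rw [hm] <;> simp
      · simp [h']

theorem foldl_max_ub (t : List Int) (h : Int) : ∀ y ∈ h :: t, y ≤ t.foldl max h := by
  induction t generalizing h with
  | nil => intro y hy; simp at hy; simp [List.foldl, hy]
  | cons v t' ih =>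
      intro y hy
      rcases List.mem_cons.mp hy with rfl | hy'
      · exact le_trans (le_max_left y v) (ih (max y v) _ (List.mem_cons_self))
      · rcases List.mem_cons.mp hy' with rfl | hy''
        · exact le_trans (le_max_right h y) (ih (max h y) _ (List.mem_cons_self))
        · exact ih (max h v) y (List.mem_cons.mpr (Or.inr hy''))

theorem exMax_mem (l : List Int) (hl : l ≠ []) : exMax l ∈ l := by
  match l with
  | [] => exact absurd rfl hl
  | h :: t => exact foldl_max_mem t h

theorem exMax_ub (l : List Int) : ∀ y ∈ l, y ≤ exMax l := by
  match l with
  | [] => intro y hy; simp at hy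
  | h :: t => exact foldl_max_ub t h

theorem exMax_unique (l : List Int) (x : Int) (hx : x ∈ l) (hub : ∀ y ∈ l, y ≤ x) :
    exMax l = x := by
  have hne : l ≠ [] := by intro h; rw [h] at hx; exact absurd hx List.not_mem_nil
  exact le_antisymm (hub _ (exMax_mem l hne)) (exMax_ub l x hx)

theorem exMax_reverse (l : List Int) : exMax l.reverse = exMax l := by
  rcases eq_or_ne l [] with rfl | hne
  · rfl
  · exact exMax_unique l.reverse (exMax l) (List.mem_reverse.mpr (exMax_mem l hne))
      (fun y hy => exMax_ub l y (List.mem_reverse.mp hy))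

-- max() of a nonempty list is exMax
theorem maxGetD_eq_exMax (l : List Int) (hl : l ≠ []) :
    (PySem.List.max? l (fun y => y)).getD 0 = exMax l := by
  match l with
  | [] => exact absurd rfl hl
  | h :: t => rw [PySem.List.max?_id_cons]; rfl

theorem scanMax_length (run : Option Int) (xs : List Int) :
    (scanMax run xs).length = xs.length := by
  induction xs generalizing run with
  | nil => rfl
  | cons v t ih => simp [scanMax, ih]

theorem scanMax_some_get (xs : List Int) (r : Int) (j : Nat) (hj : j < xs.length) :
    (scanMax (some r) xs)[j]'(by rw [scanMax_length]; exact hj) =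
      exMax (r :: xs.take (j + 1)) := by
  induction xs generalizing r j with
  | nil => simp at hj
  | cons v t ih =>
      have hrv : (if v > r then v else r) = max r v := by
        rcases max_choice r v with hm | hm <;> rw [hm] <;> split_ifs <;> omega
      match j with
      | 0 => simp [scanMax, hrv, exMax, List.foldl]
      | j' + 1 =>
          have hj' : j' < t.length := by simpa using hj
          have := ih (max r v) j' hj'
          simp only [scanMax, hrv, List.getElem_cons_succ]
          rw [this]
          simp [exMax]

-- pref[j] = max of the first j+1 elements of prev
theorem pref_get (prev : List Int) (j : Nat) (hj : j < prev.length) :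
    (scanMax none prev)[j]'(by rw [scanMax_length]; exact hj) =
      exMax (prev.take (j + 1)) := by
  match prev with
  | [] => simp at hj
  | h :: t =>
      match j with
      | 0 => simp [scanMax, exMax, List.foldl]
      | j' + 1 =>
          have hj' : j' < t.length := by simpa using hj
          have h1 : (scanMax none (h :: t))[j' + 1]'(by rw [scanMax_length]; exact hj) =
              (scanMax (some h) t)[j']'(by rw [scanMax_length]; exact hj') := by
            simp [scanMax]
          rw [h1, scanMax_some_get t h j' hj']
          simp [exMax]

-- suf[j] = max of the elements of prev from j on
theorem suf_get (prev : List Int) (j : Nat) (hj : j < prev.length) :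
    ((scanMax none prev.reverse).reverse)[j]'(by
        rw [List.length_reverse, scanMax_length, List.length_reverse]; exact hj) =
      exMax (prev.drop j) := by
  have hlen : (scanMax none prev.reverse).length = prev.length := by
    rw [scanMax_length, List.length_reverse]
  have hidx : prev.length - 1 - j < prev.reverse.length := by
    rw [List.length_reverse]; omega
  have h1 : ((scanMax none prev.reverse).reverse)[j]'(by rw [List.length_reverse, hlen]; exact hj) =
      (scanMax none prev.reverse)[prev.length - 1 - j]'(by rw [hlen]; omega) := by
    rw [List.getElem_reverse]; congr 1; omega
  rw [h1, pref_get prev.reverse (prev.length - 1 - j) hidx]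
  have htake : prev.reverse.take (prev.length - 1 - j + 1) = (prev.drop j).reverse := by
    rw [List.reverse_drop]   -- (prev.drop j).reverse = prev.reverse.take (length - j)
    congr 1
    omega
  rw [htake, exMax_reverse]

-- prev with column k removed (what A's slice concatenation denotes, in Nat form)
def exclNat (prev : List Int) (k : Nat) : List Int := prev.take k ++ prev.drop (k + 1)

theorem slices_eq_exclNat (prev : List Int) (k : Nat) :
    PySem.List.slice prev none (some (k : Int)) ++
      PySem.List.slice prev (some ((k : Int) + 1)) none = exclNat prev k := by
  have h1 : PySem.List.slice prev none (some (k : Int)) = prev.take k :=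
    PySem.List.slice_to_natCast prev k
  have h2 : PySem.List.slice prev (some ((k : Int) + 1)) none = prev.drop (k + 1) := by
    have h : ((k : Int) + 1) = ((k + 1 : Nat) : Int) := by push_cast; ring
    rw [h]
    exact PySem.List.slice_from_natCast prev (k + 1)
  rw [h1, h2]; rfl

-- the heart: B's candidate max equals A's excluded-column max
theorem cands_eq (prev : List Int) (n : Nat) (hn : prev.length = n) (h2 : 2 ≤ n)
    (k : Nat) (hk : k < n) :
    (PySem.List.max?
      ((if 0 < (k : Int) then
          [PySem.List.pyGetD (scanMax none prev) ((k : Int) - 1) 0] else []) ++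
       (if (k : Int) < (n : Int) - 1 then
          [PySem.List.pyGetD ((scanMax none prev.reverse).reverse) ((k : Int) + 1) 0] else []))
      (fun y => y)).getD 0 =
    exMax (exclNat prev k) := by
  have hpref : ∀ (j : Nat) (hj : j < n),
      PySem.List.pyGetD (scanMax none prev) ((j : Nat) : Int) 0 = exMax (prev.take (j + 1)) := by
    intro j hj
    rw [PySem.List.pyGetD_natCast, List.getD_eq_getElem _ 0 (by rw [scanMax_length]; omega)]
    exact pref_get prev j (by omega)
  have hsuf : ∀ (j : Nat) (hj : j < n),
      PySem.List.pyGetD ((scanMax none prev.reverse).reverse) ((j : Nat) : Int) 0 =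
        exMax (prev.drop j) := by
    intro j hj
    rw [PySem.List.pyGetD_natCast, List.getD_eq_getElem _ 0
      (by rw [List.length_reverse, scanMax_length, List.length_reverse]; omega)]
    exact suf_get prev j (by omega)
  by_cases hk0 : k = 0
  · subst hk0
    have hcond1 : ¬ (0 < (0 : Int)) := by omega
    have hcond2 : (0 : Int) < (n : Int) - 1 := by omega
    simp only [Nat.cast_zero, hcond1, if_false, hcond2, if_true, List.nil_append]
    have h01 : ((0 : Int) + 1) = ((1 : Nat) : Int) := by norm_num
    rw [h01, hsuf 1 (by omega)]
    rw [maxGetD_eq_exMax _ (by simp)]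
    simp [exMax, exclNat, List.foldl]
  · by_cases hklast : k = n - 1
    · have hcond1 : 0 < (k : Int) := by omega
      have hcond2 : ¬ ((k : Int) < (n : Int) - 1) := by omega
      simp only [hcond1, if_true, hcond2, if_false, List.append_nil]
      have hk1 : ((k : Int) - 1) = ((k - 1 : Nat) : Int) := by omega
      rw [hk1, hpref (k - 1) (by omega)]
      rw [maxGetD_eq_exMax _ (by simp)]
      have hdrop : prev.drop (k + 1) = [] := by
        apply List.drop_eq_nil_of_le; omega
      have htake : (k - 1) + 1 = k := by omega
      simp [exMax, exclNat, hdrop, htake, List.foldl]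
    · -- interior column: both candidates present
      have hcond1 : 0 < (k : Int) := by omega
      have hcond2 : (k : Int) < (n : Int) - 1 := by omega
      simp only [hcond1, if_true, hcond2, if_true]
      have hk1 : ((k : Int) - 1) = ((k - 1 : Nat) : Int) := by omega
      have hk2 : ((k : Int) + 1) = ((k + 1 : Nat) : Int) := by push_cast; ring
      rw [hk1, hk2, hpref (k - 1) (by omega), hsuf (k + 1) (by omega)]
      have htake : (k - 1) + 1 = k := by omega
      rw [htake]
      rw [maxGetD_eq_exMax _ (by simp)]
      have hTne : prev.take k ≠ [] := by
        have : (prev.take k).length = k := by rw [List.length_take]; omega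
        intro h; rw [h] at this; simp at this; omega
      have hDne : prev.drop (k + 1) ≠ [] := by
        have : (prev.drop (k + 1)).length = n - (k + 1) := by rw [List.length_drop]; omega
        intro h; rw [h] at this; simp at this; omega
      -- exMax [a, b] = max a b where a, b are the two part maxima
      have hstep : exMax [exMax (prev.take k), exMax (prev.drop (k + 1))] =
          max (exMax (prev.take k)) (exMax (prev.drop (k + 1))) := by
        simp [exMax]
      rw [List.singleton_append, hstep]
      symm
      apply exMax_unique
      · rcases max_choice (exMax (prev.take k)) (exMax (prev.drop (k + 1))) with hm | hm <;> rw [hm]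
        · exact List.mem_append_left _ (exMax_mem _ hTne)
        · exact List.mem_append_right _ (exMax_mem _ hDne)
      · intro y hy
        rcases List.mem_append.mp hy with h' | h'
        · exact le_trans (exMax_ub _ y h') (le_max_left _ _)
        · exact le_trans (exMax_ub _ y h') (le_max_right _ _)

-- one row step of A equals one row step of B
theorem rowStep_eq (prev cur : List Int) (n : Nat)
    (hp : prev.length = n) (hc : cur.length = n) (h2 : 2 ≤ n) :
    (PySem.List.pyRange 0 (n : Int) 1).map (fun j =>
        PySem.List.pyGetD cur j 0 +
          (PySem.List.max?
            (PySem.List.slice prev none (some j) ++ PySem.List.slice prev (some (j + 1)) none)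
            (fun y => y)).getD 0) =
    (PySem.List.pyRange 0 ((prev.length : Int)) 1).map (fun j =>
        PySem.List.pyGetD cur j 0 +
          (PySem.List.max?
            ((if 0 < j then [PySem.List.pyGetD (scanMax none prev) (j - 1) 0] else []) ++
             (if j < (prev.length : Int) - 1 then
                [PySem.List.pyGetD ((scanMax none prev.reverse).reverse) (j + 1) 0] else []))
            (fun y => y)).getD 0) := by
  rw [hp]
  apply List.ext_getElem?
  intro k
  by_cases hk : k < n
  · rw [PySem.List.getElem?_map_pyRange_zero _ n k hk,
        PySem.List.getElem?_map_pyRange_zero _ n k hk]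
    congr 2
    rw [slices_eq_exclNat prev k,
        maxGetD_eq_exMax _ (by
          intro h
          have hlen : (exclNat prev k).length = n - 1 := by
            unfold exclNat
            rw [List.length_append, List.length_take, List.length_drop]
            omega
          rw [h] at hlen; simp at hlen; omega)]
    exact (cands_eq prev n hp h2 k hk).symm
  · rw [List.getElem?_eq_none (by simp [PySem.List.pyRange_zero_natCast]; omega),
        List.getElem?_eq_none (by simp [PySem.List.pyRange_zero_natCast]; omega)]

-- the two row recursions produce the same final row
theorem go_eq (rest : List (List Int)) (prev : List Int) (n : Nat)
    (hp : prev.length = n) (h2 : rest ≠ [] → 2 ≤ n)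
    (hrows : ∀ row ∈ rest, row.length = n) :
    solutionGo n prev rest = solutionAltGo prev rest := by
  induction rest generalizing prev with
  | nil => rfl
  | cons cur rest' ih =>
    have h2n : 2 ≤ n := h2 (by simp)
    have hc : cur.length = n := hrows cur (by simp)
    rw [solutionGo, solutionAltGo]
    rw [rowStep_eq prev cur n hp hc h2n]
    apply ih
    · simp [PySem.List.pyRange_zero_natCast, hp]
    · intro _; exact h2n
    · intro row hr; exact hrows row (List.mem_cons_of_mem _ hr)

-- ===== VERDICT (by name: the statement is the Claim_ definition above) =====
theorem solution_spec : Claim_equal_solution := by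
  intro land _ hpre
  unfold Spec_solution
  obtain ⟨hne, hrows, h1, h2⟩ := hpre
  match land with
  | [] => exact absurd rfl hne
  | first :: rest =>
      simp only [solution, solution_alt]
      have hgo : solutionGo first.length first rest = solutionAltGo first rest := by
        apply go_eq rest first first.length rfl
        · intro hr
          apply h2
          match rest, hr with
          | r :: rest', _ => simp
        · intro row hrow
          have h' := hrows row (List.mem_cons_of_mem _ hrow)
          simpa using h'
      rw [hgo]
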